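-- pv_equiv track=rewrite | github.com/Paradorn-248/Computer-Programming | ซ่อมแลป/exam_hanabi2.py | hanabi2
-- ===== SOURCE A (Python) =====
-- def hanabi2(n):
--     res = [[0 for i in range(2*n-1)] for j in range(2*n-1)]
--     i = 0
--     j = 0
--     x = n
--     for _ in range(n):
--         for a in range(i,len(res)-i):
--             for b in range(j,len(res[0])-j):
--                 res[a][b] = x
--         x -= 1
--         i += 1
--         j += 1
--     return res
-- ===== SOURCE B (Python) =====
-- def hanabi2(n):
--     size = 2 * n - 1
--     return [[n - min(a, b, size - 1 - a, size - 1 - b) for b in range(size)]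
--             for a in range(size)]
-- ===== Notes on version B (the rewrite author's own statement) =====
-- stated objective: faster
-- what changed: Replaces the repeated overwriting of shrinking concentric squares (three nested loops) by a single pass computing each cell once in closed form as n - min(a, b, size-1-a, size-1-b); intended as faster (O(n^2) vs O(n^3)), measured 17.9x at the largest size both finished (n=64).
import Mathlib
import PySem

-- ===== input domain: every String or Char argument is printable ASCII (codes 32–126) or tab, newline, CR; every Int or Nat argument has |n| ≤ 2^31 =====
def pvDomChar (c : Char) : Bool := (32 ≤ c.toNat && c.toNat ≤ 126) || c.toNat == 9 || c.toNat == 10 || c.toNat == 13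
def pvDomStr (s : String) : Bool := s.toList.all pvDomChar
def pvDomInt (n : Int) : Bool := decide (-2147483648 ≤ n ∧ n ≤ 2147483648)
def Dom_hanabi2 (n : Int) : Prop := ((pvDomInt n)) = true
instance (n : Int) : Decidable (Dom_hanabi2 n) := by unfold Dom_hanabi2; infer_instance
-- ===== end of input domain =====

-- B computes each cell once in closed form instead of A's repeated overwriting of shrinking
-- concentric squares; intended as faster, measured 17.9x at the largest size both finished.

-- ===== PORT A =====
-- Body of A's outer `for _ in range(n)` loop on the state (res, i, j, x).
-- `res[a][b] = x`: both indices come from ranges starting at i, j ≥ 0 and bounded by the list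
-- lengths, so they are nonnegative and in range; plain List.set / pyGetD are exact here.
def hanabi2Body (st : List (List Int) × Int × Int × Int) (_ : Int) :
    List (List Int) × Int × Int × Int :=
  match st with
  | (res, i, j, x) =>
    let res' :=
      (PySem.List.pyRange i ((res.length : Int) - i) 1).foldl
        (fun res a =>
          (PySem.List.pyRange j (((PySem.List.pyGetD res 0 []).length : Int) - j) 1).foldl
            (fun res b =>
              res.set a.toNat ((PySem.List.pyGetD res a []).set b.toNat x))
            res)
        res
    (res', i + 1, j + 1, x - 1)

def hanabi2 (n : Int) : List (List Int) :=
  let res0 : List (List Int) :=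
    (PySem.List.pyRange 0 (2*n-1) 1).map (fun _ =>
      (PySem.List.pyRange 0 (2*n-1) 1).map (fun _ => (0 : Int)))
  let st := (PySem.List.pyRange 0 n 1).foldl hanabi2Body (res0, 0, 0, n)
  st.1

-- ===== PORT B =====
def hanabi2_alt (n : Int) : List (List Int) :=
  let size := 2*n - 1
  (PySem.List.pyRange 0 size 1).map (fun a =>
    (PySem.List.pyRange 0 size 1).map (fun b =>
      n - min (min (min a b) (size - 1 - a)) (size - 1 - b)))

-- ===== PRECONDITION & SPEC =====
def Spec_hanabi2 (n : Int) (out : List (List Int)) : Prop := out = hanabi2_alt n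
instance (n : Int) (out : List (List Int)) : Decidable (Spec_hanabi2 n out) := by unfold Spec_hanabi2; infer_instance

-- ===== CLAIM (what is proved, stated in full; the proofs are below) =====
def Claim_equal_hanabi2 : Prop := ∀ (n : Int), Dom_hanabi2 n → Spec_hanabi2 n (hanabi2 n)

-- ===== LEMMAS AND PROOFS =====

-- An s×s grid given as a function of the (row, column) indices.
def pvGrid (s : Int) (f : Int → Int → Int) : List (List Int) :=
  (PySem.List.pyRange 0 s 1).map (fun a => (PySem.List.pyRange 0 s 1).map (f a))

-- Ring depth of cell (a, b) in an s×s grid.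
def pvM (s a b : Int) : Int := min (min a b) (min (s-1-a) (s-1-b))

theorem pvGrid_congr {s : Int} {f g : Int → Int → Int}
    (h : ∀ a b, 0 ≤ a → a < s → 0 ≤ b → b < s → f a b = g a b) :
    pvGrid s f = pvGrid s g := by
  unfold pvGrid
  refine List.map_congr_left (fun a ha => ?_)
  rw [PySem.List.mem_pyRange_one] at ha
  refine List.map_congr_left (fun b hb => ?_)
  rw [PySem.List.mem_pyRange_one] at hb
  exact h a b (by omega) (by omega) (by omega) (by omega)

theorem pv_len_map {α : Type} (v : Int → α) (s : Int) :
    (((PySem.List.pyRange 0 s 1).map v).length : Int) = if 0 ≤ s then s else 0 := by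
  simp only [List.length_map, PySem.List.length_pyRange_one]
  split_ifs <;> omega

theorem pv_set_map {α : Type} (v : Int → α) (s b : Int) (x : α) (hb0 : 0 ≤ b) (_hbs : b < s) :
    ((PySem.List.pyRange 0 s 1).map v).set b.toNat x
      = (PySem.List.pyRange 0 s 1).map (fun i => if i = b then x else v i) := by
  apply List.ext_getElem
  · simp
  · intro k h1 h2
    have hk : (k : Int) < s := by
      rw [List.length_set, List.length_map, PySem.List.length_pyRange_one] at h1; omega
    simp only [List.getElem_set, List.getElem_map, PySem.List.getElem_pyRange_one]
    by_cases h : b.toNat = k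
    · have h' : (k : Int) = b := by omega
      simp [h, h']
    · have h' : ¬((k : Int) = b) := by omega
      simp [h, h']

theorem pv_get_map {α : Type} (v : Int → α) (s a : Int) (d : α) (h0 : 0 ≤ a) (hs : a < s) :
    PySem.List.pyGetD ((PySem.List.pyRange 0 s 1).map v) a d = v a := by
  rw [PySem.List.pyGetD_eq_getElem _ _ h0
    (by rw [List.length_map, PySem.List.length_pyRange_one]; omega)]
  simp only [List.getElem_map, PySem.List.getElem_pyRange_one]
  congr 1
  omega

-- Filling positions [lo, hi) of a row with x.
theorem pv_bfold_row (s hi x : Int) (hhi : hi ≤ s) :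
    ∀ t : Nat, ∀ lo : Int, 0 ≤ lo → (hi - lo).toNat = t → ∀ v : Int → Int,
    (PySem.List.pyRange lo hi 1).foldl (fun (r : List Int) b => r.set b.toNat x)
        ((PySem.List.pyRange 0 s 1).map v)
      = (PySem.List.pyRange 0 s 1).map (fun i => if lo ≤ i ∧ i < hi then x else v i) := by
  intro t
  induction t with
  | zero =>
    intro lo hlo ht v
    rw [PySem.List.pyRange_one_eq_nil (by omega : hi ≤ lo)]
    simp only [List.foldl_nil]
    refine (List.map_congr_left (fun i hin => ?_)).symm
    rw [PySem.List.mem_pyRange_one] at hin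
    rw [if_neg (by omega)]
  | succ t ih =>
    intro lo hlo ht v
    rw [PySem.List.pyRange_one_cons (by omega : lo < hi)]
    simp only [List.foldl_cons]
    rw [pv_set_map v s lo x hlo (by omega)]
    rw [ih (lo + 1) (by omega) (by omega)]
    refine List.map_congr_left (fun i hin => ?_)
    rw [PySem.List.mem_pyRange_one] at hin
    split_ifs <;> first | rfl | omega

-- The inner b-loop only rewrites row a: it is the row update lifted to the grid.
theorem pv_bfold_lift (x a : Int) (h0 : 0 ≤ a) :
    ∀ (l : List Int) (res : List (List Int)), a.toNat < res.length →
    l.foldl (fun r b => r.set a.toNat ((PySem.List.pyGetD r a []).set b.toNat x)) res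
      = res.set a.toNat
          (l.foldl (fun (row : List Int) b => row.set b.toNat x) (PySem.List.pyGetD res a [])) := by
  intro l
  induction l with
  | nil =>
    intro res h
    simp only [List.foldl_nil]
    rw [PySem.List.pyGetD_eq_getElem _ _ h0 (by omega)]
    exact (List.set_getElem_self ..).symm
  | cons b rest ih =>
    intro res h
    simp only [List.foldl_cons]
    rw [ih _ (by simpa using h)]
    have hget : PySem.List.pyGetD
        (res.set a.toNat ((PySem.List.pyGetD res a []).set b.toNat x)) a []
        = (PySem.List.pyGetD res a []).set b.toNat x := by
      rw [PySem.List.pyGetD_eq_getElem _ _ h0 (by simp only [List.length_set]; omega)]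
      exact List.getElem_set_self (by simpa using h)
    rw [hget, List.set_set]

-- One outer iteration: rows [lo, s-k) get x written on columns [k, s-k).
theorem pv_afold (s k x : Int) (hk : 0 ≤ k) :
    ∀ t : Nat, ∀ lo : Int, 0 ≤ lo → (s - k - lo).toNat = t → ∀ w : Int → Int → Int,
    (PySem.List.pyRange lo (s - k) 1).foldl
        (fun res a =>
          (PySem.List.pyRange k (((PySem.List.pyGetD res 0 []).length : Int) - k) 1).foldl
            (fun res b => res.set a.toNat ((PySem.List.pyGetD res a []).set b.toNat x)) res)
        (pvGrid s w)
      = pvGrid s (fun a b =>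
          if (lo ≤ a ∧ a < s - k) ∧ (k ≤ b ∧ b < s - k) then x else w a b) := by
  intro t
  induction t with
  | zero =>
    intro lo hlo ht w
    rw [PySem.List.pyRange_one_eq_nil (by omega : s - k ≤ lo)]
    simp only [List.foldl_nil]
    exact (pvGrid_congr (fun a b _ _ _ _ => (if_neg (by omega)).symm))
  | succ t ih =>
    intro lo hlo ht w
    have hlos : lo < s - k := by omega
    rw [PySem.List.pyRange_one_cons (by omega : lo < s - k)]
    simp only [List.foldl_cons]
    have hrow0 : PySem.List.pyGetD (pvGrid s w) 0 []
        = (PySem.List.pyRange 0 s 1).map (w 0) := by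
      unfold pvGrid
      exact pv_get_map _ s 0 [] le_rfl (by omega)
    rw [hrow0, pv_len_map, if_pos (by omega : (0:Int) ≤ s)]
    have hlen : lo.toNat < (pvGrid s w).length := by
      unfold pvGrid
      rw [List.length_map, PySem.List.length_pyRange_one]; omega
    rw [pv_bfold_lift x lo hlo _ _ hlen]
    have hrowlo : PySem.List.pyGetD (pvGrid s w) lo []
        = (PySem.List.pyRange 0 s 1).map (w lo) := by
      unfold pvGrid
      exact pv_get_map _ s lo [] hlo (by omega)
    rw [hrowlo, pv_bfold_row s (s - k) x (by omega) (s - k - k).toNat k hk rfl (w lo)]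
    have hset : (pvGrid s w).set lo.toNat
        ((PySem.List.pyRange 0 s 1).map (fun i => if k ≤ i ∧ i < s - k then x else w lo i))
        = pvGrid s (fun a b => if a = lo ∧ (k ≤ b ∧ b < s - k) then x else w a b) := by
      unfold pvGrid
      rw [pv_set_map (fun a => (PySem.List.pyRange 0 s 1).map (w a)) s lo _ hlo (by omega)]
      refine List.map_congr_left (fun a ha => ?_)
      by_cases hal : a = lo
      · subst hal
        rw [if_pos rfl]
        refine List.map_congr_left (fun b hb => ?_)
        beta_reduce
        split_ifs <;> first | rfl | omega
      · rw [if_neg hal]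
        refine (List.map_congr_left (fun b hb => ?_)).symm
        simp only [hal, false_and, if_false]
    rw [hset, ih (lo + 1) (by omega) (by omega)]
    refine pvGrid_congr (fun a b ha1 ha2 hb1 hb2 => ?_)
    beta_reduce
    split_ifs <;> first | rfl | omega

-- The whole outer loop, started at iteration k on an arbitrary grid.
theorem pv_outer (n s : Int) (hs : 1 ≤ s) :
    ∀ (l : List Int) (k : Int), 0 ≤ k → ∀ w : Int → Int → Int,
    l.foldl hanabi2Body (pvGrid s w, k, k, n - k)
      = (pvGrid s (fun a b =>
            if 1 ≤ (l.length : Int) ∧ k ≤ pvM s a b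
            then n - min (pvM s a b) (k + l.length - 1) else w a b),
         k + l.length, k + l.length, n - k - l.length) := by
  intro l
  induction l with
  | nil =>
    intro k hk w
    simp only [List.foldl_nil, List.length_nil, Nat.cast_zero, add_zero, sub_zero]
    exact congrArg (fun g => (g, k, k, n - k))
      (pvGrid_congr (fun a b _ _ _ _ => (if_neg (by omega)).symm))
  | cons e rest ih =>
    intro k hk w
    simp only [List.foldl_cons]
    have hbody : hanabi2Body (pvGrid s w, k, k, n - k) e
        = (pvGrid s (fun a b => if k ≤ pvM s a b then n - k else w a b),
           k + 1, k + 1, n - k - 1) := by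
      unfold hanabi2Body
      dsimp only
      rw [show ((pvGrid s w).length : Int) = s from by
        unfold pvGrid; rw [pv_len_map, if_pos (by omega : (0:Int) ≤ s)]]
      rw [pv_afold s k (n - k) hk (s - k - k).toNat k hk rfl w]
      exact congrArg (fun g => (g, k + 1, k + 1, n - k - 1))
        (pvGrid_congr (fun a b ha1 ha2 hb1 hb2 => by
          simp only [pvM]
          split_ifs <;> first | rfl | omega))
    rw [hbody, show n - k - 1 = n - (k + 1) from by ring, ih (k + 1) (by omega)]
    have hl : (((e :: rest).length : Nat) : Int) = (rest.length : Int) + 1 := by simp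
    rw [hl,
      show k + ((rest.length : Int) + 1) = k + 1 + (rest.length : Int) from by ring,
      show n - k - ((rest.length : Int) + 1) = n - (k + 1) - (rest.length : Int) from by ring]
    exact congrArg
      (fun g => (g, k + 1 + (rest.length : Int), k + 1 + (rest.length : Int),
        n - (k + 1) - (rest.length : Int)))
      (pvGrid_congr (fun a b ha1 ha2 hb1 hb2 => by
        split_ifs <;> first | rfl | omega))

-- ===== VERDICT (by name: the statement is the Claim_ definition above) =====
theorem hanabi2_spec : Claim_equal_hanabi2 := by
  intro n _
  unfold Spec_hanabi2
  simp only [hanabi2, hanabi2_alt]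
  by_cases hn : n ≤ 0
  · rw [PySem.List.pyRange_one_eq_nil (by omega : (2*n-1:Int) ≤ 0),
        PySem.List.pyRange_one_eq_nil (by omega : (n:Int) ≤ 0)]
    simp
  · have hs : (1:Int) ≤ 2*n - 1 := by omega
    have h0 : (PySem.List.pyRange 0 (2*n-1) 1).map (fun _ =>
        (PySem.List.pyRange 0 (2*n-1) 1).map (fun _ => (0:Int)))
        = pvGrid (2*n-1) (fun _ _ => 0) := rfl
    rw [h0]
    have hout := pv_outer n (2*n-1) hs (PySem.List.pyRange 0 n 1) 0 le_rfl (fun _ _ => 0)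
    rw [sub_zero] at hout
    rw [hout]
    simp only [PySem.List.length_pyRange_one]
    exact pvGrid_congr (fun a b ha1 ha2 hb1 hb2 => by
      simp only [pvM]
      split_ifs <;> omega)
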